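-- pv_equiv track=rewrite | github.com/tusharhero/bincode | bincode.py | txt2bin
-- ===== SOURCE A (Python) =====
-- def int2bin(
--     number,
-- ):  # https://en.m.wikipedia.org/wiki/Binary_number#Decimal_to_Binary
--     q = number
--     r = 0
--     binnum = []
--     n = 0
--     while q > 0:
--         r = q % 2
--         q = q // 2
--         binnum.append(r)
--     return binnum
--
-- def c2l(s, dic):
--     """
--     Figures out the placemenet in the dictionary.
--     The code is aquired from https://gist.github.com/tusharhero/a6341333ec592a8d3aca06277fe04e42
--     """
--
--     for index, item in enumerate(dic):
--         if s == item:  # If it finds the s is equal to the current character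
--             return index  # in the dictionary it returns it
--
--     return 0  # If not found at all returns this
--
-- def bin_length_correction(binnum, l):
--     corrbin = [0] * l
--
--     for index, item in enumerate(binnum):
--         corrbin[index] = item
--     return corrbin
--
-- txtindex = [
--     " ",
--     "b",
--     "c",
--     "d",
--     "e",
--     "f",
--     "g",
--     "h",
--     "i",
--     "j",
--     "k",
--     "l",
--     "m",
--     "n",
--     "o",
--     "p",
--     "q",
--     "r",
--     "s",
--     "t",
--     "u",
--     "v",
--     "w",
--     "x",
--     "y",
--     "z",
--     "a",
--     "1",
--     "2",
--     "3",
--     "4",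
--     "5",
--     "6",
--     "7",
--     "8",
--     "9",
--     "0",
--     ":",
--     "/",
--     ".",
-- ]
--
-- txtindex_divided = [
--     [" ", "b", "c", "d", "e", "f", "g"],
--     ["h", "i", "j", "k", "l", "m", "n"],
--     ["o", "p", "q", "r", "s", "t", "u"],
--     ["v", "w", "x", "y", "z", "a", "1"],
--     ["2", "3", "4", "5", "6", "7", "8"],
--     ["9", "0", ":", "/", "."],
-- ]
--
-- def txt2bin(txt):
--     """
--     Converts text into binnum (Experimmental).
--     """
--
--     binnum = []
--
--     for item in txt:
--         diccode = int(c2l(item, txtindex) / 7)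
--         codeindic = c2l(item, txtindex_divided[diccode])
--         binnum += bin_length_correction(int2bin(diccode), 3) + bin_length_correction(
--             int2bin(codeindic), 3
--         )
--
--     return binnum
-- ===== SOURCE B (Python) =====
-- txtindex = [
--     " ", "b", "c", "d", "e", "f", "g", "h", "i", "j", "k", "l", "m",
--     "n", "o", "p", "q", "r", "s", "t", "u", "v", "w", "x", "y", "z",
--     "a", "1", "2", "3", "4", "5", "6", "7", "8", "9", "0", ":", "/", ".",
-- ]
--
-- def _code(i):
--     hi, lo = divmod(i, 7)
--     return [hi & 1, (hi >> 1) & 1, (hi >> 2) & 1,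
--             lo & 1, (lo >> 1) & 1, (lo >> 2) & 1]
--
-- _TABLE = {ch: _code(i) for i, ch in enumerate(txtindex)}
--
-- def txt2bin(txt):
--     binnum = []
--     for ch in txt:
--         binnum += _TABLE.get(ch, [0, 0, 0, 0, 0, 0])
--     return binnum
-- ===== Notes on version B (the rewrite author's own statement) =====
-- stated objective: faster
-- what changed: Replaces the per-character pair of linear index scans (c2l over txtindex and over txtindex_divided) plus the div/mod, int2bin loop and padding loop with a char->6-bit-code dict precomputed once from txtindex via divmod and bit arithmetic, so the loop body is a single table lookup with default [0]*6.
import Mathlib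
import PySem

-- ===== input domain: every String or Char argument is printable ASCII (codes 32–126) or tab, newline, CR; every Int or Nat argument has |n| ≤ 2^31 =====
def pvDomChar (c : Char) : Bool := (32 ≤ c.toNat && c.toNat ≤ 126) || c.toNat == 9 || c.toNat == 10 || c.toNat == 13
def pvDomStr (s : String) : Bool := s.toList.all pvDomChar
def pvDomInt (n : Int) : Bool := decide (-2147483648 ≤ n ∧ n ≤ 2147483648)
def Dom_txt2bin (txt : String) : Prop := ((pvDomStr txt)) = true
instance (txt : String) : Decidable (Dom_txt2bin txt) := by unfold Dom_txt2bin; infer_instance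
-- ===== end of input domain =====

-- B replaces A's two linear scans + per-character arithmetic with one precomputed char→6-bit-code table, for a simpler single-lookup loop.


-- ===== PORT A =====
def pvTxtindex : List Char :=
  [' ', 'b', 'c', 'd', 'e', 'f', 'g', 'h', 'i', 'j', 'k', 'l', 'm',
   'n', 'o', 'p', 'q', 'r', 's', 't', 'u', 'v', 'w', 'x', 'y', 'z',
   'a', '1', '2', '3', '4', '5', '6', '7', '8', '9', '0', ':', '/', '.']

def pvTxtindexDivided : List (List Char) :=
  [[' ', 'b', 'c', 'd', 'e', 'f', 'g'],
   ['h', 'i', 'j', 'k', 'l', 'm', 'n'],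
   ['o', 'p', 'q', 'r', 's', 't', 'u'],
   ['v', 'w', 'x', 'y', 'z', 'a', '1'],
   ['2', '3', '4', '5', '6', '7', '8'],
   ['9', '0', ':', '/', '.']]

-- int2bin's while loop; structural recursion on a fuel that is always sufficient
-- (q.toNat strictly decreases while q > 0, so fuel = number.toNat + 1 never runs out: exact)
def int2binGo (fuel : Nat) (q : Int) : List Int :=
  match fuel with
  | 0 => []
  | f + 1 => if q > 0 then PySem.Int.mod q 2 :: int2binGo f (PySem.Int.floordiv q 2) else []

def int2bin (number : Int) : List Int := int2binGo (number.toNat + 1) number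

-- the early-return for-loop of c2l, carrying the running enumerate index
def c2lGo (s : Char) (dic : List Char) (idx : Int) : Int :=
  match dic with
  | [] => 0
  | d :: ds => if s = d then idx else c2lGo s ds (idx + 1)

def c2l (s : Char) (dic : List Char) : Int := c2lGo s dic 0

-- bin_length_correction: [0]*l then overwrite the prefix (List.set; in-range at every call site here)
def binLengthCorrection (binnum : List Int) (l : Nat) : List Int :=
  binnum.zipIdx.foldl (fun corrbin p => corrbin.set p.2 p.1) (List.replicate l 0)

def txt2bin (txt : String) : List Int :=
  txt.toList.foldl
    (fun binnum item =>
      let diccode := PySem.Int.truncdiv (c2l item pvTxtindex) 7  -- int(x / 7), x ≥ 0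
      let codeindic := c2l item (pvTxtindexDivided.getD diccode.toNat [])  -- index always in range (diccode ≤ 5)
      binnum ++ (binLengthCorrection (int2bin diccode) 3 ++ binLengthCorrection (int2bin codeindic) 3))
    []

-- ===== PORT B =====
def pvCode (i : Int) : List Int :=
  let hi := PySem.Int.floordiv i 7
  let lo := PySem.Int.mod i 7
  [PySem.Int.band hi 1, PySem.Int.band (hi >>> (1:Nat)) 1, PySem.Int.band (hi >>> (2:Nat)) 1,
   PySem.Int.band lo 1, PySem.Int.band (lo >>> (1:Nat)) 1, PySem.Int.band (lo >>> (2:Nat)) 1]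

-- the dict comprehension {ch: _code(i) for i, ch in enumerate(txtindex)}
def pvTable : PySem.Dict Char (List Int) :=
  (PySem.List.enumerate pvTxtindex 0).foldl
    (fun d p => d.insert p.2 (pvCode p.1)) PySem.Dict.empty

def txt2bin_alt (txt : String) : List Int :=
  txt.toList.foldl (fun binnum ch => binnum ++ pvTable.getD ch [0, 0, 0, 0, 0, 0]) []

-- ===== PRECONDITION & SPEC =====
def Spec_txt2bin (txt : String) (out : List Int) : Prop := out = txt2bin_alt txt
instance (txt : String) (out : List Int) : Decidable (Spec_txt2bin txt out) := by unfold Spec_txt2bin; infer_instance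

-- ===== CLAIM (what is proved, stated in full; the proofs are below) =====
def Claim_equal_txt2bin : Prop := ∀ (txt : String), Dom_txt2bin txt → Spec_txt2bin txt (txt2bin txt)

-- ===== LEMMAS AND PROOFS =====

-- A's per-character chunk
def pvChunkA (item : Char) : List Int :=
  let diccode := PySem.Int.truncdiv (c2l item pvTxtindex) 7
  let codeindic := c2l item (pvTxtindexDivided.getD diccode.toNat [])
  binLengthCorrection (int2bin diccode) 3 ++ binLengthCorrection (int2bin codeindic) 3

lemma c2lGo_of_not_mem (s : Char) (dic : List Char) (idx : Int) (h : s ∉ dic) :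
    c2lGo s dic idx = 0 := by
  induction dic generalizing idx with
  | nil => rfl
  | cons d ds ih =>
    simp only [List.mem_cons, not_or] at h
    simp [c2lGo, h.1, ih _ h.2]

-- the dict-comprehension fold, evaluated once to its literal items
set_option maxRecDepth 8192 in
lemma table_items : pvTable = PySem.Dict.mk [(' ', [0, 0, 0, 0, 0, 0]), ('b', [0, 0, 0, 1, 0, 0]), ('c', [0, 0, 0, 0, 1, 0]), ('d', [0, 0, 0, 1, 1, 0]), ('e', [0, 0, 0, 0, 0, 1]), ('f', [0, 0, 0, 1, 0, 1]), ('g', [0, 0, 0, 0, 1, 1]), ('h', [1, 0, 0, 0, 0, 0]), ('i', [1, 0, 0, 1, 0, 0]), ('j', [1, 0, 0, 0, 1, 0]), ('k', [1, 0, 0, 1, 1, 0]), ('l', [1, 0, 0, 0, 0, 1]), ('m', [1, 0, 0, 1, 0, 1]), ('n', [1, 0, 0, 0, 1, 1]), ('o', [0, 1, 0, 0, 0, 0]), ('p', [0, 1, 0, 1, 0, 0]), ('q', [0, 1, 0, 0, 1, 0]), ('r', [0, 1, 0, 1, 1, 0]), ('s', [0, 1, 0, 0, 0, 1]), ('t',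 [0, 1, 0, 1, 0, 1]), ('u', [0, 1, 0, 0, 1, 1]), ('v', [1, 1, 0, 0, 0, 0]), ('w', [1, 1, 0, 1, 0, 0]), ('x', [1, 1, 0, 0, 1, 0]), ('y', [1, 1, 0, 1, 1, 0]), ('z', [1, 1, 0, 0, 0, 1]), ('a', [1, 1, 0, 1, 0, 1]), ('1', [1, 1, 0, 0, 1, 1]), ('2', [0, 0, 1, 0, 0, 0]), ('3', [0, 0, 1, 1, 0, 0]), ('4', [0, 0, 1, 0, 1, 0]), ('5', [0, 0, 1, 1, 1, 0]), ('6', [0, 0, 1, 0, 0, 1]), ('7', [0, 0, 1, 1, 0, 1]), ('8', [0, 0, 1, 0, 1, 1]), ('9', [1, 0, 1, 0, 0, 0]), ('0', [1, 0, 1, 1, 0, 0]), (':', [1, 0, 1, 0, 1, 0]), ('/', [1, 0, 1, 1, 1, 0]), ('.', [1, 0, 1, 0, 0, 1])] := by decide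

set_option maxRecDepth 8192 in
lemma chunk_eq_mem :
    pvTxtindex.all (fun c => pvChunkA c == pvTable.getD c [0, 0, 0, 0, 0, 0]) = true := by
  rw [table_items]; decide

lemma table_keys : pvTable.keys = pvTxtindex := by rw [table_items]; decide

set_option maxRecDepth 8192 in
lemma chunk_eq (c : Char) : pvChunkA c = pvTable.getD c [0, 0, 0, 0, 0, 0] := by
  by_cases hc : c ∈ pvTxtindex
  · exact eq_of_beq (List.all_eq_true.mp chunk_eq_mem c hc)
  · have h0 : c2l c pvTxtindex = 0 := c2lGo_of_not_mem c pvTxtindex 0 hc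
    have hrow : c ∉ pvTxtindexDivided.getD (0 : Nat) [] := by
      intro hm
      have hsub : (pvTxtindexDivided.getD (0 : Nat) []).all
          (fun x => decide (x ∈ pvTxtindex)) = true := by decide
      exact hc (of_decide_eq_true (List.all_eq_true.mp hsub c hm))
    have hA : pvChunkA c = [0, 0, 0, 0, 0, 0] := by
      simp only [pvChunkA, h0]
      have : c2l c (pvTxtindexDivided.getD ((PySem.Int.truncdiv 0 7).toNat) []) = 0 := by
        exact c2lGo_of_not_mem c _ 0 (by simpa [PySem.Int.truncdiv] using hrow)
      rw [this]
      decide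
    have hB : pvTable.getD c [0, 0, 0, 0, 0, 0] = [0, 0, 0, 0, 0, 0] := by
      rw [table_items]
      apply PySem.Dict.getD_of_not_contains
      rw [← table_items, PySem.Dict.contains_eq_decide_mem_keys, table_keys]
      simpa using hc
    rw [hA, hB]

-- ===== VERDICT (by name: the statement is the Claim_ definition above) =====
theorem txt2bin_spec : Claim_equal_txt2bin := by
  intro txt _
  show txt2bin txt = txt2bin_alt txt
  unfold txt2bin txt2bin_alt
  have : (fun (binnum : List Int) (item : Char) =>
      binnum ++ (binLengthCorrection (int2bin (PySem.Int.truncdiv (c2l item pvTxtindex) 7)) 3 ++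
        binLengthCorrection (int2bin (c2l item (pvTxtindexDivided.getD
          (PySem.Int.truncdiv (c2l item pvTxtindex) 7).toNat []))) 3)) =
      fun binnum ch => binnum ++ pvTable.getD ch [0, 0, 0, 0, 0, 0] := by
    funext binnum c
    have := chunk_eq c
    simp only [pvChunkA] at this
    rw [← this]
  rw [this]
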